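-- pv_equiv track=rewrite | github.com/IgrMd/yandex-algos-training | Тренировки по алгоритмам 6.0/Лекция 2. Префиксные суммы и два указателя/D.py | days_to_complete_tasks
-- ===== SOURCE A (Python) =====
-- def days_to_complete_tasks(n, k, tasks: list[int]):
--     cur_day = 0
--     tasks.sort()
--     days = [0] * n
--     r = 0
--     for l in range(n):
--         if days[l] == 0:
--             cur_day += 1
--             days[l] = cur_day
--         while r < n and (tasks[r] - tasks[l] <= k or days[r] != 0):
--             r += 1
--         if r < n:
--             days[r] = days[l]
--     return cur_day
-- ===== SOURCE B (Python) =====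
-- def days_to_complete_tasks(n, k, tasks: list[int]):
--     # same in-place sort side effect as the original
--     tasks.sort()
--     days = 0
--     l = 0
--     for r in range(n):
--         if l < r and tasks[r] - tasks[l] > k:
--             l += 1          # task r is done on the same day as chain head l
--         else:
--             days += 1       # task r starts a new day
--     return days
-- ===== Notes on version B (the rewrite author's own statement) =====
-- stated objective: simpler
-- what changed: B drops A's days array, day-counter bookkeeping and nested while: after sorting it makes a single pass with one chained-head pointer l, counting a new day exactly when task r cannot extend an earlier chain (l < r and gap > k fails).
import Mathlib
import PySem

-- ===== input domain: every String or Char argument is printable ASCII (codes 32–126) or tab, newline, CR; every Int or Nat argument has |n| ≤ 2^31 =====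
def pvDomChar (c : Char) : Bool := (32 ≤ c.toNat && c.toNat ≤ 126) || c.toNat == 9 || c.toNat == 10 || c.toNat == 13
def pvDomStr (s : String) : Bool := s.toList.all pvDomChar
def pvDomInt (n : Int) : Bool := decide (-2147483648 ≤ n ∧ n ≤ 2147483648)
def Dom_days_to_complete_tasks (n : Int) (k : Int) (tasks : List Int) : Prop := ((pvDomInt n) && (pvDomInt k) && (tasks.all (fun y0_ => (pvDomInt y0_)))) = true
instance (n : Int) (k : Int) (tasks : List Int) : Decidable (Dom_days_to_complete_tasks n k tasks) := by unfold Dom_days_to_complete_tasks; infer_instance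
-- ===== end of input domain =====

-- B drops A's days array, day-counter bookkeeping and nested while, counting days in a
-- single pass with one chain-head pointer (simpler, O(1) extra space, same asymptotics).
-- Both Pythons sort `tasks` in place; the theorem is about the return value (the mutation
-- is identical in A and B).

-- ===== PORT A =====
-- A's inner loop: `while r < n and (tasks[r] - tasks[l] <= k or days[r] != 0): r += 1`
def pvAWhile (ts : List Int) (days : List Int) (n : Int) (k : Int) (tl : Int) (r : Int) : Int :=
  if h : r < n ∧ (PySem.List.pyGetD ts r 0 - tl ≤ k ∨ PySem.List.pyGetD days r 0 ≠ 0) then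
    pvAWhile ts days n k tl (r + 1)
  else r
termination_by (n - r).toNat
decreasing_by omega

def days_to_complete_tasks (n : Int) (k : Int) (tasks : List Int) : Int :=
  -- tasks.sort(); days = [0]*n; r = 0; for l in range(n): …
  -- (under Pre_ every index is in range, so the total pyGetD/pySetD forms are exact)
  let ts := PySem.List.sorted tasks (fun x => x) false
  let st := (PySem.List.pyRange 0 n 1).foldl (fun st l =>
    let cur := st.1
    let days := st.2.1
    let r := st.2.2
    let cur' := if PySem.List.pyGetD days l 0 = 0 then cur + 1 else cur
    let days' := if PySem.List.pyGetD days l 0 = 0 then PySem.List.pySetD days l cur' else days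
    let r' := pvAWhile ts days' n k (PySem.List.pyGetD ts l 0) r
    let days'' := if r' < n then PySem.List.pySetD days' r' (PySem.List.pyGetD days' l 0) else days'
    (cur', days'', r')) (0, List.replicate n.toNat 0, 0)
  st.1

-- ===== PORT B =====
def days_to_complete_tasks_alt (n : Int) (k : Int) (tasks : List Int) : Int :=
  -- tasks.sort(); days = 0; l = 0; for r in range(n): …
  let ts := PySem.List.sorted tasks (fun x => x) false
  let st := (PySem.List.pyRange 0 n 1).foldl (fun st r =>
    if st.1 < r ∧ PySem.List.pyGetD ts r 0 - PySem.List.pyGetD ts st.1 0 > k then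
      (st.1 + 1, st.2)
    else
      (st.1, st.2 + 1)) ((0 : Int), (0 : Int))
  st.2

-- ===== PRECONDITION & SPEC =====
-- Pre_ excludes exactly the inputs on which Python A raises IndexError: n > len(tasks)
-- (B raises there as well).
def Pre_days_to_complete_tasks (n : Int) (k : Int) (tasks : List Int) : Prop :=
  n ≤ (tasks.length : Int)
instance (n : Int) (k : Int) (tasks : List Int) : Decidable (Pre_days_to_complete_tasks n k tasks) := by unfold Pre_days_to_complete_tasks; infer_instance

def pvWitness_days_to_complete_tasks : Int × Int × List Int := (3, 1, [2, 1, 3])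

def Spec_days_to_complete_tasks (n : Int) (k : Int) (tasks : List Int) (out : Int) : Prop := out = days_to_complete_tasks_alt n k tasks
instance (n : Int) (k : Int) (tasks : List Int) (out : Int) : Decidable (Spec_days_to_complete_tasks n k tasks out) := by unfold Spec_days_to_complete_tasks; infer_instance

-- ===== CLAIM (what is proved, stated in full; the proofs are below) =====
def Claim_equal_days_to_complete_tasks : Prop := ∀ (n : Int) (k : Int) (tasks : List Int), Dom_days_to_complete_tasks n k tasks → Pre_days_to_complete_tasks n k tasks → Spec_days_to_complete_tasks n k tasks (days_to_complete_tasks n k tasks)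

-- ===== LEMMAS AND PROOFS =====
def pvSkip (ts : List Int) (k : Int) (m : Nat) (tl : Int) (r : Nat) : Nat :=
  if h : r < m ∧ ts.getD r 0 - tl ≤ k then pvSkip ts k m tl (r + 1) else r
termination_by m - r
decreasing_by omega

theorem pvSkip_ge (ts : List Int) (k : Int) (m : Nat) (tl : Int) (r : Nat) :
    r ≤ pvSkip ts k m tl r := by
  fun_induction pvSkip with
  | case1 r h ih => omega
  | case2 r h => omega

theorem pvSkip_le (ts : List Int) (k : Int) (m : Nat) (tl : Int) (r : Nat) (h : r ≤ m) :
    pvSkip ts k m tl r ≤ m := by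
  fun_induction pvSkip with
  | case1 r h ih => exact ih (by omega)
  | case2 r h2 => omega

theorem pvAWhile_pure (ts days : List Int) (m : Nat) (k tl : Int) (r : Nat)
    (hfresh : ∀ i : Nat, r ≤ i → days.getD i 0 = 0) :
    pvAWhile ts days (m : Int) k tl (r : Int) = ((pvSkip ts k m tl r : Nat) : Int) := by
  induction hj : m - r using Nat.strong_induction_on generalizing r with
  | _ j ih =>
    have hd : days.getD r 0 = 0 := hfresh r (le_refl r)
    rw [pvAWhile, pvSkip]
    simp only [PySem.List.pyGetD_natCast, hd, ne_eq, not_true_eq_false, or_false, Nat.cast_lt]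
    by_cases hc : r < m ∧ ts.getD r 0 - tl ≤ k
    · rw [dif_pos hc, dif_pos hc]
      have hcast : ((r : Int) + 1) = ((r + 1 : Nat) : Int) := by push_cast; ring
      rw [hcast]
      exact ih (m - (r+1)) (by omega) (r+1) (fun i hi => hfresh i (by omega)) rfl
    · rw [dif_neg hc, dif_neg hc]

def pvScan (ts : List Int) (k : Int) (m : Nat) (l : Nat) (r : Nat) : Nat :=
  if h : r < m then
    if l < r ∧ ts.getD r 0 - ts.getD l 0 > k then pvScan ts k m (l + 1) (r + 1) + 1
    else pvScan ts k m l (r + 1)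
  else 0
termination_by m - r
decreasing_by all_goals omega

theorem pvScan_unfold_skip (ts : List Int) (k : Int) (m l r : Nat) (h : l < r) :
    pvScan ts k m l r =
      if pvSkip ts k m (ts.getD l 0) r < m then
        pvScan ts k m (l + 1) (pvSkip ts k m (ts.getD l 0) r + 1) + 1
      else 0 := by
  induction hj : m - r using Nat.strong_induction_on generalizing r with
  | _ j ih =>
    by_cases hrm : r < m
    · by_cases hgap : ts.getD r 0 - ts.getD l 0 ≤ k
      · have hskip : pvSkip ts k m (ts.getD l 0) r = pvSkip ts k m (ts.getD l 0) (r + 1) := by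
          rw [pvSkip, dif_pos ⟨hrm, hgap⟩]
        rw [pvScan, dif_pos hrm, if_neg (by omega), hskip]
        exact ih (m - (r+1)) (by omega) (r+1) (by omega) rfl
      · have hskip : pvSkip ts k m (ts.getD l 0) r = r := by
          rw [pvSkip, dif_neg (by intro hc; exact hgap hc.2)]
        rw [pvScan, dif_pos hrm, if_pos ⟨h, by omega⟩, hskip, if_pos hrm]
    · have hskip : pvSkip ts k m (ts.getD l 0) r = r := by
        rw [pvSkip, dif_neg (by intro hc; exact hrm hc.1)]
      rw [pvScan, dif_neg hrm, hskip, if_neg hrm]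

theorem pvScan_self (ts : List Int) (k : Int) (m l : Nat) :
    pvScan ts k m l l = pvScan ts k m l (l + 1) := by
  by_cases hlm : l < m
  · rw [pvScan, dif_pos hlm, if_neg (by omega)]
  · rw [pvScan, dif_neg hlm, pvScan, dif_neg (by omega)]

def pvCnt (days : List Int) (l : Nat) (m : Nat) : Nat :=
  if h : l < m then (if days.getD l 0 = 0 then 0 else 1) + pvCnt days (l + 1) m else 0
termination_by m - l
decreasing_by omega

theorem pvCnt_congr (days days' : List Int) (l m : Nat)
    (h : ∀ i : Nat, l ≤ i → i < m → days'.getD i 0 = days.getD i 0) :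
    pvCnt days' l m = pvCnt days l m := by
  induction hj : m - l using Nat.strong_induction_on generalizing l with
  | _ j ih =>
    by_cases hlm : l < m
    · rw [pvCnt, dif_pos hlm]
      conv_rhs => rw [pvCnt, dif_pos hlm]
      rw [h l (le_refl l) hlm, ih (m - (l+1)) (by omega) (l+1) (fun i h1 h2 => h i (by omega) h2) rfl]
    · rw [pvCnt, dif_neg hlm]
      conv_rhs => rw [pvCnt, dif_neg hlm]

theorem pvCnt_set_fresh (days : List Int) (l m x : Nat) (v : Int)
    (hlen : days.length = m) (hx1 : l ≤ x) (hx2 : x < m)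
    (hfresh : days.getD x 0 = 0) (hv : v ≠ 0) :
    pvCnt (days.set x v) l m = pvCnt days l m + 1 := by
  induction hj : m - l using Nat.strong_induction_on generalizing l with
  | _ j ih =>
    have hlm : l < m := by omega
    by_cases hlx : l = x
    · subst hlx
      rw [pvCnt, dif_pos hlm]
      conv_rhs => rw [pvCnt, dif_pos hlm]
      have hset : (days.set l v).getD l 0 = v := by
        rw [List.getD_eq_getElem?_getD, List.getElem?_set_self (by omega)]
        simp
      rw [hset, hfresh, if_neg hv, if_pos rfl,
          pvCnt_congr (days := days) (days' := days.set l v) (l + 1) m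
            (fun i h1 h2 => by rw [List.getD_eq_getElem?_getD, List.getElem?_set_ne (by omega), ← List.getD_eq_getElem?_getD])]
      omega
    · rw [pvCnt, dif_pos hlm]
      conv_rhs => rw [pvCnt, dif_pos hlm]
      have hne : (days.set x v).getD l 0 = days.getD l 0 := by
        rw [List.getD_eq_getElem?_getD, List.getElem?_set_ne (by omega), ← List.getD_eq_getElem?_getD]
      rw [hne, ih (m - (l+1)) (by omega) (l+1) (by omega) rfl]
      omega

theorem pvCnt_zero (days : List Int) (l m : Nat)
    (h : ∀ i : Nat, days.getD i 0 = 0) : pvCnt days l m = 0 := by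
  induction hj : m - l using Nat.strong_induction_on generalizing l with
  | _ j ih =>
    by_cases hlm : l < m
    · rw [pvCnt, dif_pos hlm, h l, if_pos rfl, ih (m - (l+1)) (by omega) (l+1) rfl]
    · rw [pvCnt, dif_neg hlm]

theorem pvB_fold (ts : List Int) (k : Int) (m : Nat) :
    ∀ (j r l : Nat) (d : Int), m - r ≤ j → l ≤ r → r ≤ m →
    (((PySem.List.pyRange (r : Int) (m : Int) 1).foldl (fun st x =>
      if st.1 < x ∧ PySem.List.pyGetD ts x 0 - PySem.List.pyGetD ts st.1 0 > k then
        (st.1 + 1, st.2)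
      else
        (st.1, st.2 + 1)) ((l : Int), d)).2 : Int)
      = d + (m : Int) - (r : Int) - (pvScan ts k m l r : Int) := by
  intro j
  induction j with
  | zero =>
    intro r l d h1 h2 h3
    have hrm : r = m := by omega
    subst hrm
    rw [PySem.List.pyRange_one_eq_nil (le_refl _), List.foldl_nil, pvScan, dif_neg (by omega)]
    push_cast; ring
  | succ j ih =>
    intro r l d h1 h2 h3
    by_cases hrm : r < m
    · have hc1 : ((r : Int)) < (m : Int) := by exact_mod_cast hrm
      rw [PySem.List.pyRange_one_cons hc1, List.foldl_cons]
      have hcast : ((r : Int) + 1) = ((r + 1 : Nat) : Int) := by push_cast; ring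
      by_cases hc : l < r ∧ ts.getD r 0 - ts.getD l 0 > k
      · rw [if_pos (by simpa [PySem.List.pyGetD_natCast, Nat.cast_lt] using hc)]
        have hl : ((l : Int) + 1) = ((l + 1 : Nat) : Int) := by push_cast; ring
        rw [hcast, hl, ih (r+1) (l+1) d (by omega) (by omega) (by omega)]
        conv_rhs => rw [pvScan]
        rw [dif_pos hrm, if_pos hc]
        push_cast; ring
      · rw [if_neg (by simp only [PySem.List.pyGetD_natCast, Nat.cast_lt]; exact hc)]
        rw [hcast, ih (r+1) l (d+1) (by omega) (by omega) (by omega)]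
        conv_rhs => rw [pvScan]
        rw [dif_pos hrm, if_neg hc]
        push_cast; ring
    · have hrm' : r = m := by omega
      subst hrm'
      rw [PySem.List.pyRange_one_eq_nil (le_refl _), List.foldl_nil, pvScan, dif_neg (by omega)]
      push_cast; ring

theorem pvGetD_set_ne (xs : List Int) (i j : Nat) (v : Int) (h : i ≠ j) :
    (xs.set i v).getD j 0 = xs.getD j 0 := by
  simp [List.getD_eq_getElem?_getD, List.getElem?_set_ne h]

theorem pvGetD_set_self (xs : List Int) (i : Nat) (v : Int) (h : i < xs.length) :
    (xs.set i v).getD i 0 = v := by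
  simp [List.getD_eq_getElem?_getD, List.getElem?_set_self h]

def pvR (days : List Int) (m : Nat) (r : Nat) : Nat :=
  if r < m ∧ days.getD r 0 ≠ 0 then r + 1 else r

theorem pvAWhileR (ts days : List Int) (m : Nat) (k tl : Int) (r : Nat)
    (hlen : days.length = m) (hfresh : ∀ i : Nat, r < i → days.getD i 0 = 0) :
    pvAWhile ts days (m : Int) k tl (r : Int) = ((pvSkip ts k m tl (pvR days m r) : Nat) : Int) := by
  by_cases hD : r < m ∧ days.getD r 0 ≠ 0
  · rw [pvAWhile, dif_pos ⟨by exact_mod_cast hD.1,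
      Or.inr (by simpa [PySem.List.pyGetD_natCast] using hD.2)⟩]
    have hcast : ((r : Int) + 1) = ((r + 1 : Nat) : Int) := by push_cast; ring
    rw [hcast, pvAWhile_pure ts days m k tl (r + 1) (fun i hi => hfresh i (by omega)),
        pvR, if_pos hD]
  · have hfr : ∀ i : Nat, r ≤ i → days.getD i 0 = 0 := by
      intro i hi
      rcases eq_or_lt_of_le hi with h | h
      · subst h
        by_cases hrm : r < m
        · push Not at hD
          exact hD hrm
        · exact List.getD_eq_default days 0 (by omega)
      · exact hfresh i h
    rw [pvAWhile_pure ts days m k tl r hfr, pvR, if_neg hD]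

def pvABody (ts : List Int) (k : Int) (n : Int) : Int × List Int × Int → Int → Int × List Int × Int :=
  fun st l =>
    let cur := st.1
    let days := st.2.1
    let r := st.2.2
    let cur' := if PySem.List.pyGetD days l 0 = 0 then cur + 1 else cur
    let days' := if PySem.List.pyGetD days l 0 = 0 then PySem.List.pySetD days l cur' else days
    let r' := pvAWhile ts days' n k (PySem.List.pyGetD ts l 0) r
    let days'' := if r' < n then PySem.List.pySetD days' r' (PySem.List.pyGetD days' l 0) else days'
    (cur', days'', r')

theorem pvA_step (ts : List Int) (k : Int) (m j : Nat)
    (ih : ∀ (l r : Nat) (cur : Int) (days : List Int), m - l ≤ j → l ≤ r → r ≤ m →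
      days.length = m → 0 ≤ cur → (∀ i : Nat, r < i → days.getD i 0 = 0) →
      (((PySem.List.pyRange (l : Int) (m : Int) 1).foldl (pvABody ts k (m : Int)) (cur, days, (r : Int))).1 : Int)
        = cur + (m : Int) - (l : Int) - (pvCnt days l m : Int) - (pvScan ts k m l (pvR days m r) : Int))
    (l r : Nat) (cur₁ : Int) (days₁ : List Int)
    (hj : m - (l + 1) ≤ j) (hlm : l < m) (hlr : l ≤ r) (hrm : r ≤ m)
    (hlen₁ : days₁.length = m) (hcur₁ : 0 ≤ cur₁)
    (hfresh₁ : ∀ i : Nat, r < i → days₁.getD i 0 = 0)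
    (hvl : days₁.getD l 0 ≠ 0) :
    (((PySem.List.pyRange ((l + 1 : Nat) : Int) (m : Int) 1).foldl (pvABody ts k (m : Int))
        (cur₁,
         (if ((pvSkip ts k m (ts.getD l 0) (pvR days₁ m r) : Nat) : Int) < (m : Int)
          then days₁.set (pvSkip ts k m (ts.getD l 0) (pvR days₁ m r)) (days₁.getD l 0)
          else days₁),
         ((pvSkip ts k m (ts.getD l 0) (pvR days₁ m r) : Nat) : Int))).1 : Int)
      = cur₁ + (m : Int) - (l : Int) - (pvCnt days₁ l m : Int)
          - (pvScan ts k m l (pvR days₁ m r) : Int) := by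
  set r1 := pvR days₁ m r with hr1def
  set r2 := pvSkip ts k m (ts.getD l 0) r1 with hr2def
  have hr1ger : r ≤ r1 := by rw [hr1def, pvR]; split <;> omega
  have hr1ge : l + 1 ≤ r1 := by
    rcases eq_or_lt_of_le hlr with h | h
    · rw [hr1def, pvR, if_pos ⟨by omega, by rw [← h]; exact hvl⟩]; omega
    · omega
  have hr1le : r1 ≤ m := by rw [hr1def, pvR]; split <;> omega
  have hfresh1' : ∀ i : Nat, r1 ≤ i → days₁.getD i 0 = 0 := by
    intro i hi
    by_cases hD : r < m ∧ days₁.getD r 0 ≠ 0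
    · rw [hr1def, pvR, if_pos hD] at hi; exact hfresh₁ i (by omega)
    · rw [hr1def, pvR, if_neg hD] at hi
      rcases eq_or_lt_of_le hi with h | h
      · push Not at hD
        by_cases hrm2 : r < m
        · rw [← h]; exact hD hrm2
        · exact List.getD_eq_default days₁ 0 (by omega)
      · exact hfresh₁ i h
  have hr2ge : r1 ≤ r2 := pvSkip_ge ts k m (ts.getD l 0) r1
  have hr2le : r2 ≤ m := pvSkip_le ts k m (ts.getD l 0) r1 hr1le
  by_cases hlink : r2 < m
  · rw [if_pos (show ((r2 : Nat) : Int) < (m : Int) by exact_mod_cast hlink)]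
    rw [ih (l + 1) r2 cur₁ (days₁.set r2 (days₁.getD l 0)) hj (by omega) hr2le
          (by rw [List.length_set]; exact hlen₁) hcur₁
          (fun i hi => by
            rw [pvGetD_set_ne _ _ _ _ (by omega)]
            exact hfresh₁ i (by omega))]
    have hpvR2 : pvR (days₁.set r2 (days₁.getD l 0)) m r2 = r2 + 1 := by
      rw [pvR, if_pos ⟨hlink, by
        rw [pvGetD_set_self _ _ _ (by omega)]; exact hvl⟩]
    rw [hpvR2,
        pvCnt_set_fresh days₁ (l + 1) m r2 _ hlen₁ (by omega) hlink (hfresh1' _ hr2ge) hvl]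
    conv_rhs => rw [pvCnt]
    rw [dif_pos hlm, if_neg hvl, pvScan_unfold_skip ts k m l r1 (by omega)]
    rw [← hr2def, if_pos hlink]
    push_cast; ring
  · have hr2m : r2 = m := by omega
    rw [if_neg (show ¬ ((r2 : Nat) : Int) < (m : Int) by exact_mod_cast hlink)]
    rw [ih (l + 1) r2 cur₁ days₁ hj (by omega) hr2le hlen₁ hcur₁
          (fun i hi => hfresh₁ i (by omega))]
    have hpvR2 : pvR days₁ m r2 = r2 := by
      rw [pvR, if_neg (fun hc => hlink hc.1)]
    have hscan0 : pvScan ts k m (l + 1) (pvR days₁ m r2) = 0 := by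
      rw [hpvR2, hr2m, pvScan, dif_neg (by omega)]
    rw [hscan0]
    conv_rhs => rw [pvCnt]
    rw [dif_pos hlm, if_neg hvl, pvScan_unfold_skip ts k m l r1 (by omega)]
    rw [← hr2def, if_neg hlink]
    push_cast; ring

theorem pvA_fold (ts : List Int) (k : Int) (m : Nat) :
    ∀ (j l r : Nat) (cur : Int) (days : List Int), m - l ≤ j → l ≤ r → r ≤ m →
    days.length = m → 0 ≤ cur →
    (∀ i : Nat, r < i → days.getD i 0 = 0) →
    (((PySem.List.pyRange (l : Int) (m : Int) 1).foldl (pvABody ts k (m : Int)) (cur, days, (r : Int))).1 : Int)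
      = cur + (m : Int) - (l : Int) - (pvCnt days l m : Int)
          - (pvScan ts k m l (pvR days m r) : Int) := by
  intro j
  induction j with
  | zero =>
    intro l r cur days h1 h2 h3 hlen hcur hfresh
    have hlm : l = m := by omega
    have hrm : r = m := by omega
    rw [PySem.List.pyRange_one_eq_nil (by exact_mod_cast hlm.ge), List.foldl_nil,
        pvCnt, dif_neg (by omega)]
    have hpvR : pvR days m r = r := by
      rw [pvR, if_neg (fun hc => absurd hc.1 (by omega))]
    rw [hpvR, pvScan, dif_neg (by omega)]
    push_cast; omega
  | succ j ih =>
    intro l r cur days h1 h2 h3 hlen hcur hfresh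
    by_cases hlm : l < m
    · have hc1 : ((l : Int)) < (m : Int) := by exact_mod_cast hlm
      rw [PySem.List.pyRange_one_cons hc1, List.foldl_cons]
      have hcast : ((l : Int) + 1) = ((l + 1 : Nat) : Int) := by push_cast; ring
      rw [hcast]
      -- reduce the body application
      show (((PySem.List.pyRange ((l + 1 : Nat) : Int) (m : Int) 1).foldl (pvABody ts k (m : Int))
        (pvABody ts k (m : Int) (cur, days, (r : Int)) (l : Int))).1 : Int) = _
      simp only [pvABody, PySem.List.pyGetD_natCast, PySem.List.pySetD_natCast]
      by_cases hDl : days.getD l 0 = 0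
      · simp only [if_pos hDl]
        -- days₁ = days.set l (cur + 1), cur₁ = cur + 1
        have hlen₁ : (days.set l (cur + 1)).length = m := by rw [List.length_set]; exact hlen
        have hfresh₁ : ∀ i : Nat, r < i → (days.set l (cur + 1)).getD i 0 = 0 := fun i hi => by
          rw [pvGetD_set_ne _ _ _ _ (by omega)]; exact hfresh i hi
        have hvl : (days.set l (cur + 1)).getD l 0 ≠ 0 := by
          rw [pvGetD_set_self _ _ _ (by omega)]; omega
        rw [pvAWhileR ts (days.set l (cur + 1)) m k (ts.getD l 0) r hlen₁ hfresh₁]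
        have hset : PySem.List.pySetD (days.set l (cur + 1))
            ((pvSkip ts k m (ts.getD l 0) (pvR (days.set l (cur + 1)) m r) : Nat) : Int)
            ((days.set l (cur + 1)).getD l 0)
            = (days.set l (cur + 1)).set (pvSkip ts k m (ts.getD l 0) (pvR (days.set l (cur + 1)) m r))
                ((days.set l (cur + 1)).getD l 0) := by
          rw [PySem.List.pySetD_natCast]
        rw [hset]
        rw [pvA_step ts k m j ih l r (cur + 1) (days.set l (cur + 1)) (by omega) hlm h2 h3
              hlen₁ (by omega) hfresh₁ hvl]
        -- translate cnt and scan back to the original days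
        have hcnt : pvCnt (days.set l (cur + 1)) l m = pvCnt days l m + 1 := by
          exact pvCnt_set_fresh days l m l (cur + 1) hlen (le_refl l) hlm hDl (by omega)
        have hscan : pvScan ts k m l (pvR (days.set l (cur + 1)) m r)
            = pvScan ts k m l (pvR days m r) := by
          rcases eq_or_lt_of_le h2 with h | h
          · -- r = l
            have h1' : pvR (days.set l (cur + 1)) m r = l + 1 := by
              rw [pvR, ← h, if_pos ⟨by omega, hvl⟩]
            have h2' : pvR days m r = l := by
              rw [pvR, ← h, if_neg (fun hc => hc.2 hDl)]
            rw [h1', h2', pvScan_self]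
          · have : pvR (days.set l (cur + 1)) m r = pvR days m r := by
              rw [pvR, pvR, pvGetD_set_ne _ _ _ _ (by omega)]
            rw [this]
        rw [hcnt, hscan]
        push_cast; ring
      · simp only [if_neg hDl]
        rw [pvAWhileR ts days m k (ts.getD l 0) r hlen hfresh]
        have hset : PySem.List.pySetD days
            ((pvSkip ts k m (ts.getD l 0) (pvR days m r) : Nat) : Int) (days.getD l 0)
            = days.set (pvSkip ts k m (ts.getD l 0) (pvR days m r)) (days.getD l 0) := by
          rw [PySem.List.pySetD_natCast]
        rw [hset]
        exact pvA_step ts k m j ih l r cur days (by omega) hlm h2 h3 hlen hcur hfresh hDl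
    · have hlm' : l = m := by omega
      have hrm : r = m := by omega
      rw [PySem.List.pyRange_one_eq_nil (by exact_mod_cast hlm'.ge), List.foldl_nil,
          pvCnt, dif_neg (by omega)]
      have hpvR : pvR days m r = r := by
        rw [pvR, if_neg (fun hc => absurd hc.1 (by omega))]
      rw [hpvR, pvScan, dif_neg (by omega)]
      push_cast; omega

theorem pvMain (ts : List Int) (k : Int) (m : Nat) :
    ((PySem.List.pyRange ((0 : Nat) : Int) ((m : Nat) : Int) 1).foldl (pvABody ts k ((m : Nat) : Int))
        (((0 : Nat) : Int), List.replicate m (0 : Int), ((0 : Nat) : Int))).1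
      = ((PySem.List.pyRange ((0 : Nat) : Int) ((m : Nat) : Int) 1).foldl (fun st r =>
          if st.1 < r ∧ PySem.List.pyGetD ts r 0 - PySem.List.pyGetD ts st.1 0 > k then
            (st.1 + 1, st.2)
          else
            (st.1, st.2 + 1)) (((0 : Nat) : Int), ((0 : Nat) : Int))).2 := by
  have hrepl : ∀ i : Nat, (List.replicate m (0 : Int)).getD i 0 = 0 := by
    intro i
    by_cases h : i < m
    · rw [List.getD_eq_getElem?_getD, List.getElem?_replicate]
      simp [h]
    · exact List.getD_eq_default _ 0 (by simpa using h)
  have hA := pvA_fold ts k m m 0 0 ((0 : Nat) : Int) (List.replicate m 0) (by omega)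
    (le_refl 0) (by omega) (by simp) (by omega) (fun i _ => hrepl i)
  have hB := pvB_fold ts k m m 0 0 ((0 : Nat) : Int) (by omega) (le_refl 0) (by omega)
  have hpvR0 : pvR (List.replicate m (0 : Int)) m 0 = 0 := by
    rw [pvR, if_neg (fun hc => hc.2 (hrepl 0))]
  rw [hpvR0, pvCnt_zero _ _ _ hrepl] at hA
  rw [hA, hB]
  omega

-- ===== VERDICT (by name: the statement is the Claim_ definition above) =====
theorem days_to_complete_tasks_spec : Claim_equal_days_to_complete_tasks := by
  intro n k tasks _hdom _hpre
  unfold Spec_days_to_complete_tasks days_to_complete_tasks days_to_complete_tasks_alt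
  by_cases hn : 0 ≤ n
  · obtain ⟨m, rfl⟩ : ∃ m : Nat, n = ((m : Nat) : Int) := ⟨n.toNat, by omega⟩
    exact pvMain (PySem.List.sorted tasks (fun x => x) false) k m
  · rw [PySem.List.pyRange_one_eq_nil (by omega)]
    rfl
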